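-- pv_equiv track=rewrite | github.com/dayeonkimm/CodingTest_Practice | 프로그래머스/1/138477. 명예의 전당 （1）/명예의 전당 （1）.py | solution
-- ===== SOURCE A (Python) =====
-- def solution(k, score):
--     answer = []
--     for i in range(len(score)):
--         if i<k:
--             answer.append(min(score[:i+1]))
--         else:
--             score_list = score[:i+1]
--             score_list.sort(reverse=True)
--             answer.append(score_list[k-1])
--     return answer
-- ===== SOURCE B (Python) =====
-- def solution(k, score):
--     # One pass: keep the processed prefix as a sorted (ascending) list,
--     # inserting each new score at its position found by binary search;
--     # the answer for each prefix is then a direct index into that list.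
--     answer = []
--     s = []
--     for x in score:
--         lo, hi = 0, len(s)
--         while lo < hi:
--             mid = (lo + hi) // 2
--             if x < s[mid]:
--                 hi = mid
--             else:
--                 lo = mid + 1
--         s.insert(lo, x)
--         if len(s) < k:
--             answer.append(s[0])
--         else:
--             answer.append(s[len(s) - k])
--     return answer
-- ===== Notes on version B (the rewrite author's own statement) =====
-- stated objective: faster
-- what changed: Instead of slicing and fully re-sorting every prefix, B maintains one ascending sorted list across the single pass, inserting each new score at its binary-search position and reading the answer by direct index.
-- outside the precondition, e.g. on solution(0, [3, 1, 2]): A returns [3, 1, 1], B raises IndexError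
import Mathlib
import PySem

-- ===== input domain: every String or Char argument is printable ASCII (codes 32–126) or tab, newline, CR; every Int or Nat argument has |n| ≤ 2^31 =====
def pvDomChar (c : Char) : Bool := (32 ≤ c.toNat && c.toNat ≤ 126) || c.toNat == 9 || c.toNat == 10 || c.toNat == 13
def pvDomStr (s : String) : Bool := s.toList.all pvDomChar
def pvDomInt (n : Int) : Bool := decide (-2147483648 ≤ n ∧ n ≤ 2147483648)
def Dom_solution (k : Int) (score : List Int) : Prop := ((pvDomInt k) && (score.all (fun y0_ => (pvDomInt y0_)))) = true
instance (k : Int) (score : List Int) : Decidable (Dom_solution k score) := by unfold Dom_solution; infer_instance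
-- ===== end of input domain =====

-- B replaces A's per-prefix slice-and-full-sort with one pass that keeps the processed prefix
-- as a single ascending sorted list (binary-search insertion) and reads each answer by index.

-- ===== PORT A =====
def solution (k : Int) (score : List Int) : List Int :=
  (PySem.List.pyRange 0 (score.length : Int) 1).foldl (fun answer i =>
    if i < k then
      -- min(score[:i+1]); the slice is nonempty for every i produced by the range, so min? is some
      answer ++ [(PySem.List.min? (PySem.List.slice score none (some (i + 1))) (fun y => y)).getD 0]
    else
      -- score_list = score[:i+1]; score_list.sort(reverse=True); score_list[k-1]
      -- (Python raises IndexError when k-1 is out of range — those inputs are outside Pre_)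
      answer ++ [PySem.List.pyGetD
        (PySem.List.sorted (PySem.List.slice score none (some (i + 1))) (fun y => y) true)
        (k - 1) 0]) []

-- ===== PORT B =====
-- the hand-written binary search 'lo, hi = 0, len(s); while lo < hi: …' of Source B (lo, hi, mid
-- are always in 0‥len(s), so Nat arithmetic and s.getD are exact for s[mid] and (lo+hi)//2;
-- the loop shrinks hi-lo every iteration, so fuel = hi-lo makes it total without changing it)
def insPosGo (x : Int) (s : List Int) : Nat → Nat → Nat → Nat
  | 0, lo, _ => lo
  | fuel + 1, lo, hi =>
    if lo < hi then
      let mid := (lo + hi) / 2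
      if x < s.getD mid 0 then insPosGo x s fuel lo mid else insPosGo x s fuel (mid + 1) hi
    else lo

def insPos (x : Int) (s : List Int) (lo hi : Nat) : Nat := insPosGo x s (hi - lo) lo hi

def solution_alt (k : Int) (score : List Int) : List Int :=
  (score.foldl (fun (st : List Int × List Int) x =>
      let lo := insPos x st.1 0 st.1.length
      -- s.insert(lo, x) with 0 ≤ lo ≤ len(s): exactly take lo ++ [x] ++ drop lo
      let s := st.1.take lo ++ x :: st.1.drop lo
      (s, st.2 ++ [if (s.length : Int) < k then PySem.List.pyGetD s 0 0
                   else PySem.List.pyGetD s ((s.length : Int) - k) 0])) ([], [])).2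

-- ===== PRECONDITION & SPEC =====
-- Pre_ excludes k ≤ 0 with a nonempty score: for k ≤ -1 A raises IndexError, and for k = 0
-- A's value comes from negative-index wraparound (score_list[-1]) where B's own indexing raises.
def Pre_solution (k : Int) (score : List Int) : Prop := 1 ≤ k ∨ score = []
instance (k : Int) (score : List Int) : Decidable (Pre_solution k score) := by unfold Pre_solution; infer_instance
def pvWitness_solution : Int × List Int := (3, [10, 100, 20, 150])

def Spec_solution (k : Int) (score : List Int) (out : List Int) : Prop := out = solution_alt k score
instance (k : Int) (score : List Int) (out : List Int) : Decidable (Spec_solution k score out) := by unfold Spec_solution; infer_instance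

-- ===== CLAIM (what is proved, stated in full; the proofs are below) =====
def Claim_equal_solution : Prop := ∀ (k : Int) (score : List Int), Dom_solution k score → Pre_solution k score → Spec_solution k score (solution k score)

-- ===== LEMMAS AND PROOFS =====

-- a sorted list is monotone position-wise (getD view of List.pairwise_iff_getElem)
theorem pw_getD (s : List Int) (hs : s.Pairwise (· ≤ ·)) (i j : Nat) (hij : i ≤ j) (hj : j < s.length) :
    s.getD i 0 ≤ s.getD j 0 := by
  rcases Nat.eq_or_lt_of_le hij with h | h
  · subst h; rfl
  · rw [List.getD_eq_getElem s 0 (by omega), List.getD_eq_getElem s 0 hj]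
    exact List.pairwise_iff_getElem.mp hs i j (by omega) hj h

-- the binary search returns the bisect_right position: everything before it is ≤ x, everything from it on is > x
theorem insPosGo_spec (x : Int) (s : List Int) (hs : s.Pairwise (· ≤ ·)) (fuel : Nat) :
    ∀ lo hi, hi - lo ≤ fuel → lo ≤ hi → hi ≤ s.length →
    (∀ j, j < lo → s.getD j 0 ≤ x) → (∀ j, hi ≤ j → j < s.length → x < s.getD j 0) →
    insPosGo x s fuel lo hi ≤ s.length ∧ (∀ j, j < insPosGo x s fuel lo hi → s.getD j 0 ≤ x) ∧
      (∀ j, insPosGo x s fuel lo hi ≤ j → j < s.length → x < s.getD j 0) := by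
  induction fuel with
  | zero =>
    intro lo hi hf h1 h2 hb ha
    simp only [insPosGo]
    exact ⟨by omega, hb, fun j hj => ha j (by omega)⟩
  | succ fuel ih =>
    intro lo hi hf h1 h2 hb ha
    rw [insPosGo]
    by_cases h : lo < hi
    · simp only [h, if_pos]
      by_cases hx : x < s.getD ((lo + hi) / 2) 0
      · simp only [hx, if_pos]
        exact ih lo ((lo + hi) / 2) (by omega) (by omega) (by omega) hb
          (fun j hj1 hj2 => lt_of_lt_of_le hx (pw_getD s hs _ j hj1 hj2))
      · simp only [hx]
        exact ih ((lo + hi) / 2 + 1) hi (by omega) (by omega) h2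
          (fun j hj => by
            rcases Nat.lt_or_ge j lo with h' | h'
            · exact hb j h'
            · exact le_trans (pw_getD s hs j ((lo + hi) / 2) (by omega) (by omega)) (not_lt.mp hx)) ha
    · simp only [h, if_neg, not_false_iff]
      exact ⟨by omega, hb, fun j hj => ha j (by omega)⟩

theorem insPos_spec (x : Int) (s : List Int) (hs : s.Pairwise (· ≤ ·)) (lo hi : Nat)
    (h1 : lo ≤ hi) (h2 : hi ≤ s.length)
    (hb : ∀ j, j < lo → s.getD j 0 ≤ x) (ha : ∀ j, hi ≤ j → j < s.length → x < s.getD j 0) :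
    insPos x s lo hi ≤ s.length ∧ (∀ j, j < insPos x s lo hi → s.getD j 0 ≤ x) ∧
      (∀ j, insPos x s lo hi ≤ j → j < s.length → x < s.getD j 0) :=
  insPosGo_spec x s hs (hi - lo) lo hi le_rfl h1 h2 hb ha

-- the insertion step of B's loop, named for the proofs
def insStep (s : List Int) (x : Int) : List Int :=
  s.take (insPos x s 0 s.length) ++ x :: s.drop (insPos x s 0 s.length)

-- inserting at the bisect position keeps the list sorted
theorem ins_pairwise (x : Int) (s : List Int) (hs : s.Pairwise (· ≤ ·)) :
    (insStep s x).Pairwise (· ≤ ·) := by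
  obtain ⟨hlen, hle, hgt⟩ := insPos_spec x s hs 0 s.length (by omega) le_rfl
    (by omega) (by omega)
  unfold insStep
  set p := insPos x s 0 s.length with hp
  have hmemtake : ∀ a ∈ s.take p, a ≤ x := by
    intro a hma
    obtain ⟨j, hj, rfl⟩ := List.mem_iff_getElem.mp hma
    have hj' : j < p ∧ j < s.length := by
      have := hj; simp only [List.length_take, Nat.lt_min] at this; exact this
    rw [List.getElem_take, ← List.getD_eq_getElem s 0 hj'.2]
    exact hle j hj'.1
  have hmemdrop : ∀ b ∈ s.drop p, x < b := by
    intro b hmb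
    obtain ⟨j, hj, rfl⟩ := List.mem_iff_getElem.mp hmb
    have hjl : p + j < s.length := by
      have := hj; simp only [List.length_drop] at this; omega
    rw [List.getElem_drop, ← List.getD_eq_getElem s 0 hjl]
    exact hgt (p + j) (by omega) hjl
  rw [List.pairwise_append]
  refine ⟨hs.sublist (List.take_sublist _ _), ?_, ?_⟩
  · rw [List.pairwise_cons]
    exact ⟨fun b hb => le_of_lt (hmemdrop b hb), hs.sublist (List.drop_sublist _ _)⟩
  · intro a ha b hb
    rcases List.mem_cons.mp hb with rfl | hb'
    · exact hmemtake a ha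
    · exact le_trans (hmemtake a ha) (le_of_lt (hmemdrop b hb'))

theorem ins_perm (x : Int) (s : List Int) : (insStep s x).Perm (x :: s) := by
  unfold insStep
  refine List.Perm.trans List.perm_middle ?_
  rw [List.take_append_drop]

-- loop invariant: B's running list is a sorted permutation of the processed prefix
theorem sfold_sorted_perm (l : List Int) (s0 : List Int) (hs0 : s0.Pairwise (· ≤ ·)) :
    (l.foldl insStep s0).Pairwise (· ≤ ·) ∧ (l.foldl insStep s0).Perm (s0 ++ l) := by
  induction l generalizing s0 with
  | nil => exact ⟨by simpa using hs0, by simp⟩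
  | cons x t ih =>
    obtain ⟨hp, hperm⟩ := ih (insStep s0 x) (ins_pairwise x s0 hs0)
    refine ⟨hp, ?_⟩
    simp only [List.foldl_cons]
    refine hperm.trans ?_
    refine List.Perm.trans (List.Perm.append_right t (ins_perm x s0)) ?_
    exact List.Perm.symm (List.perm_middle)

-- the value B appends once the sorted prefix s is known
def bVal (k : Int) (s : List Int) : Int :=
  if (s.length : Int) < k then PySem.List.pyGetD s 0 0
  else PySem.List.pyGetD s ((s.length : Int) - k) 0

-- B's loop produces, per position, bVal of the insStep-fold over the prefix
theorem alt_shape (k : Int) (l : List Int) (s0 a0 : List Int) :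
    (l.foldl (fun (st : List Int × List Int) x =>
      let lo := insPos x st.1 0 st.1.length
      let s := st.1.take lo ++ x :: st.1.drop lo
      (s, st.2 ++ [if (s.length : Int) < k then PySem.List.pyGetD s 0 0
                   else PySem.List.pyGetD s ((s.length : Int) - k) 0])) (s0, a0)).2
    = a0 ++ (List.range l.length).map (fun i => bVal k ((l.take (i+1)).foldl insStep s0)) := by
  induction l generalizing s0 a0 with
  | nil => simp
  | cons x t ih =>
    simp only [List.foldl_cons, List.length_cons]
    rw [ih]
    rw [List.range_succ_eq_map, List.map_cons, List.map_map, List.append_assoc,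
      List.singleton_append]
    congr 1

-- the value A appends for index i
def aVal (k : Int) (score : List Int) (i : Nat) : Int :=
  if (i : Int) < k then (PySem.List.min? (score.take (i+1)) (fun y => y)).getD 0
  else PySem.List.pyGetD (PySem.List.sorted (score.take (i+1)) (fun y => y) true) (k - 1) 0

-- A's loop is a map over the prefix indices
theorem a_shape (k : Int) (score : List Int) :
    solution k score = (List.range score.length).map (aVal k score) := by
  unfold solution
  rw [PySem.List.pyRange_one]
  simp only [Int.sub_zero, Int.toNat_natCast, List.foldl_map]
  have h : ∀ (acc : List Int), (List.range score.length).foldl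
      (fun answer (i : Nat) =>
        if (0 + (i:Int)) < k then
          answer ++ [(PySem.List.min? (PySem.List.slice score none (some ((0 + (i:Int)) + 1))) (fun y => y)).getD 0]
        else
          answer ++ [PySem.List.pyGetD
            (PySem.List.sorted (PySem.List.slice score none (some ((0 + (i:Int)) + 1))) (fun y => y) true)
            (k - 1) 0]) acc = acc ++ (List.range score.length).map (aVal k score) := by
    intro acc
    rw [← PySem.List.foldl_append_singleton_eq_map]
    apply PySem.List.foldl_congr_mem
    intro a i _
    have hslice : PySem.List.slice score none (some ((0 + (i:Int)) + 1)) = score.take (i+1) := by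
      rw [Int.zero_add]
      have hc : (i:Int) + 1 = ((i+1 : Nat) : Int) := by push_cast; ring
      rw [hc, PySem.List.slice_to_natCast]
    rw [hslice]
    unfold aVal
    by_cases hik : (i:Int) < k
    · rw [if_pos (by omega), if_pos hik]
    · rw [if_neg (by omega), if_neg hik]
  exact h []

-- for every prefix, A's appended value equals B's
theorem pointwise (k : Int) (score : List Int) (hk : 1 ≤ k) (i : Nat) (hi : i < score.length) :
    aVal k score i = bVal k ((score.take (i+1)).foldl insStep []) := by
  set p := score.take (i+1) with hpdef
  obtain ⟨hsort, hperm⟩ := sfold_sorted_perm p [] (by simp)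
  set s := p.foldl insStep [] with hsdef
  rw [List.nil_append] at hperm
  have hplen : p.length = i + 1 := by
    rw [hpdef, List.length_take]; omega
  have hslen : s.length = i + 1 := by rw [hperm.length_eq, hplen]
  unfold aVal bVal
  by_cases h : (i : Int) < k
  · rw [if_pos h]
    -- B's value is s[0] = min of the prefix in both of its branches
    have hs0 : s ≠ [] := by intro hc; rw [hc] at hslen; simp at hslen
    obtain ⟨m, t, hms⟩ := List.exists_cons_of_ne_nil hs0
    have hbv : (if (s.length : Int) < k then PySem.List.pyGetD s 0 0
        else PySem.List.pyGetD s ((s.length : Int) - k) 0) = m := by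
      have hg0 : PySem.List.pyGetD s 0 0 = m := by
        rw [PySem.List.pyGetD_of_nonneg s 0 le_rfl, hms]; rfl
      by_cases h2 : (s.length : Int) < k
      · rw [if_pos h2, hg0]
      · have hlk : (s.length : Int) = k := by omega
        rw [if_neg h2, hlk, sub_self, hg0]
    rw [hbv]
    have hpne : p ≠ [] := by intro hc; rw [hc] at hplen; simp at hplen
    obtain ⟨m0, hm0⟩ : ∃ m0, PySem.List.min? p (fun y => y) = some m0 := by
      cases hmin : PySem.List.min? p (fun y => y) with
      | none => exact absurd ((PySem.List.min?_eq_none_iff p _).mp hmin) hpne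
      | some m0 => exact ⟨m0, rfl⟩
    rw [hm0, Option.getD_some]
    have hm0min := PySem.List.min?_isMin hm0
    have hm0mem := PySem.List.min?_mem hm0
    have hmmin : ∀ y ∈ s, m ≤ y := by
      intro y hy
      rcases List.mem_cons.mp (hms ▸ hy) with rfl | hy'
      · exact le_rfl
      · exact List.rel_of_pairwise_cons (hms ▸ hsort) hy'
    have h1 : m0 ≤ m := hm0min m (hperm.mem_iff.mp (by rw [hms]; exact List.mem_cons_self))
    have h2 : m ≤ m0 := hmmin m0 (hperm.mem_iff.mpr hm0mem)
    omega
  · rw [if_neg h]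
    have hlk : k ≤ (i : Int) := le_of_not_gt h
    have hnb : ¬ ((s.length : Int) < k) := by rw [hslen]; push_cast; omega
    rw [if_neg hnb]
    -- A's descending sort of the prefix is the reverse of B's ascending list
    have hdesc : PySem.List.sorted p (fun y => y) true = s.reverse := by
      refine PySem.List.eq_of_perm_of_pairwise_le_of_injective (fun a : Int => -a)
        (fun a b hab => by simpa using hab) ?_ ?_ ?_
      · exact (PySem.List.sorted_perm p _ true).trans (hperm.symm.trans s.reverse_perm.symm)
      · exact (PySem.List.sorted_pairwise_rev p (fun y => y)).imp (by intro a b hab; simpa using hab)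
      · rw [List.pairwise_reverse]
        exact hsort.imp (by intro a b hab; simpa using hab)
    rw [hdesc]
    have hlen' : s.reverse.length = i + 1 := by rw [List.length_reverse, hslen]
    rw [PySem.List.pyGetD_eq_getElem s.reverse 0 (by omega) (by rw [hlen']; push_cast; omega),
        PySem.List.pyGetD_eq_getElem s 0 (by omega) (by rw [hslen]; push_cast; omega)]
    rw [List.getElem_reverse]
    congr 1
    rw [hslen]
    omega

-- ===== VERDICT (by name: the statement is the Claim_ definition above) =====
theorem solution_spec : Claim_equal_solution := by
  intro k score _ hpre
  unfold Spec_solution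
  rcases hpre with hk | hempty
  · rw [a_shape]
    unfold solution_alt
    rw [alt_shape]
    rw [List.nil_append]
    exact List.map_congr_left (fun i hi => pointwise k score hk i (List.mem_range.mp hi))
  · subst hempty; rfl
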